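-- pv_equiv track=rewrite | github.com/mbollmann/levenshtein | conv_norm.py | process_alignment
-- ===== SOURCE A (Python) =====
-- BEGIN_TOKEN = "__BEGIN__"
--
-- def process_alignment(alignment, epsilon):
--     input_token = BEGIN_TOKEN
--     output_token = epsilon
--     for (lhs, rhs) in alignment:
--         if lhs == epsilon:
--             if output_token == epsilon:
--                 output_token = rhs
--             else:
--                 output_token += rhs
--         else:
--             yield (input_token, output_token)
--             input_token = lhs
--             output_token = rhs
--     yield (input_token, output_token)
-- ===== SOURCE B (Python) =====
-- BEGIN_TOKEN = "__BEGIN__"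
--
-- def process_alignment(alignment, epsilon):
--     # B: partition into groups headed by non-epsilon lhs rows (with an implicit
--     # BEGIN group first), then fold each group's rhs list into the output token.
--     def take_eps(rows):
--         i = 0
--         while i < len(rows) and rows[i][0] == epsilon:
--             i += 1
--         return [r[1] for r in rows[:i]], rows[i:]
--
--     rows = list(alignment)
--     eps0, rest = take_eps(rows)
--     groups = [(BEGIN_TOKEN, [epsilon] + eps0)]
--     while rest:
--         (lhs, rhs), tail = rest[0], rest[1:]
--         eps, rest = take_eps(tail)
--         groups.append((lhs, [rhs] + eps))
--     for tok, rhss in groups: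
--         out = rhss[0]
--         for r in rhss[1:]:
--             out = r if out == epsilon else out + r
--         yield (tok, out)
-- ===== Notes on version B (the rewrite author's own statement) =====
-- stated objective: alternative
-- what changed: Replaces A's single stateful yield-on-the-fly loop by a two-phase decomposition: first partition the alignment into groups headed by each non-epsilon lhs (with an implicit BEGIN group), then fold each group's rhs list (replace-when-epsilon, else concatenate) to produce one pair per group.
import Mathlib
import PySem

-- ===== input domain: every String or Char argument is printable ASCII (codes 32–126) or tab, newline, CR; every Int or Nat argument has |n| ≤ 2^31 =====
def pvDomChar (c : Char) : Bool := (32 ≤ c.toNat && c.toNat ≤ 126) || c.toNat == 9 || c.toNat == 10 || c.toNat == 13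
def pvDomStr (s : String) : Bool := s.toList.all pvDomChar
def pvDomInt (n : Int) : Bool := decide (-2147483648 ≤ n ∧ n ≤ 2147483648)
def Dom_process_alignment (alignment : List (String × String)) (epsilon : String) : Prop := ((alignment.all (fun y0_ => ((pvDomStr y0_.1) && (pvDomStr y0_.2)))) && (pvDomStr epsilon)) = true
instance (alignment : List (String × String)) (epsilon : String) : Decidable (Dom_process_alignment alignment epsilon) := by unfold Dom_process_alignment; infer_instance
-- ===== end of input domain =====

-- B replaces A's single stateful yield-as-you-go loop by a partition-into-groups
-- pass followed by a per-group fold (objective: alternative decomposition; return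
-- value only — both are Python generators, materialised here as lists).

-- ===== PORT A =====
-- A: one fold over the alignment carrying (yielded list, input_token, output_token),
-- with a final trailing yield; pvStepA is the loop body.
def pvStepA (epsilon : String) (s : List (String × String) × String × String)
    (p : String × String) : List (String × String) × String × String :=
  let (acc, input_token, output_token) := s
  let (lhs, rhs) := p
  if lhs == epsilon then
    if output_token == epsilon then (acc, input_token, rhs)
    else (acc, input_token, output_token ++ rhs)
  else (acc ++ [(input_token, output_token)], lhs, rhs)

def process_alignment (alignment : List (String × String)) (epsilon : String) : List (String × String) :=
  let s := alignment.foldl (pvStepA epsilon) ([], "__BEGIN__", epsilon)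
  s.1 ++ [(s.2.1, s.2.2)]

-- ===== PORT B =====
-- take_eps: longest prefix of rows with lhs == epsilon → (their rhs's, remaining rows)
def pvTakeEps (epsilon : String) : List (String × String) → List String × List (String × String)
  | [] => ([], [])
  | (lhs, rhs) :: rest =>
    if lhs == epsilon then
      let (eps, r) := pvTakeEps epsilon rest
      (rhs :: eps, r)
    else ([], (lhs, rhs) :: rest)

theorem pvTakeEps_len (epsilon : String) (l : List (String × String)) :
    (pvTakeEps epsilon l).2.length ≤ l.length := by
  induction l with
  | nil => simp [pvTakeEps]
  | cons p rest ih =>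
    obtain ⟨lhs, rhs⟩ := p
    simp only [pvTakeEps]
    split
    · simpa using Nat.le_succ_of_le ih
    · simp

-- the while-loop over `rest`: one group per non-epsilon head
def pvGroups (epsilon : String) : List (String × String) → List (String × List String)
  | [] => []
  | (lhs, rhs) :: tail =>
    (lhs, rhs :: (pvTakeEps epsilon tail).1) :: pvGroups epsilon (pvTakeEps epsilon tail).2
termination_by l => l.length
decreasing_by simpa using Nat.lt_succ_of_le (pvTakeEps_len epsilon tail)

-- fold of one group's rhs list into its output token
def pvFoldGroup (epsilon : String) (g : String × List String) : String × String :=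
  (g.1, g.2.tail.foldl (fun out r => if out == epsilon then r else out ++ r) (g.2.headD epsilon))

def process_alignment_alt (alignment : List (String × String)) (epsilon : String) : List (String × String) :=
  let (eps0, rest) := pvTakeEps epsilon alignment
  (("__BEGIN__", epsilon :: eps0) :: pvGroups epsilon rest).map (pvFoldGroup epsilon)

-- ===== PRECONDITION & SPEC =====
def Spec_process_alignment (alignment : List (String × String)) (epsilon : String) (out : List (String × String)) : Prop := out = process_alignment_alt alignment epsilon
instance (alignment : List (String × String)) (epsilon : String) (out : List (String × String)) : Decidable (Spec_process_alignment alignment epsilon out) := by unfold Spec_process_alignment; infer_instance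

-- ===== CLAIM (what is proved, stated in full; the proofs are below) =====
def Claim_equal_process_alignment : Prop := ∀ (alignment : List (String × String)) (epsilon : String), Dom_process_alignment alignment epsilon → Spec_process_alignment alignment epsilon (process_alignment alignment epsilon)

-- ===== LEMMAS AND PROOFS =====

-- a clean recursive characterisation of A's loop (state without the accumulator)
def pvConsume (epsilon : String) (it ot : String) : List (String × String) → List (String × String)
  | [] => [(it, ot)]
  | (lhs, rhs) :: rest =>
    if lhs == epsilon then
      pvConsume epsilon it (if ot == epsilon then rhs else ot ++ rhs) rest
    else (it, ot) :: pvConsume epsilon lhs rhs rest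

theorem pvA_eq_consume (epsilon : String) (l : List (String × String)) :
    ∀ (acc : List (String × String)) (it ot : String),
    (let s := l.foldl (pvStepA epsilon) (acc, it, ot)
     s.1 ++ [(s.2.1, s.2.2)]) = acc ++ pvConsume epsilon it ot l := by
  induction l with
  | nil => intro acc it ot; simp [pvConsume]
  | cons p rest ih =>
    intro acc it ot
    obtain ⟨lhs, rhs⟩ := p
    rw [List.foldl_cons]
    by_cases h : lhs == epsilon
    · by_cases h2 : ot == epsilon
      · rw [show pvStepA epsilon (acc, it, ot) (lhs, rhs) = (acc, it, rhs) by
              simp [pvStepA, h, h2]]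
        rw [ih acc it rhs]
        simp [pvConsume, h, h2]
      · rw [show pvStepA epsilon (acc, it, ot) (lhs, rhs) = (acc, it, ot ++ rhs) by
              simp [pvStepA, h, h2]]
        rw [ih acc it (ot ++ rhs)]
        simp [pvConsume, h, h2]
    · rw [show pvStepA epsilon (acc, it, ot) (lhs, rhs) = (acc ++ [(it, ot)], lhs, rhs) by
            simp [pvStepA, h]]
      rw [ih (acc ++ [(it, ot)]) lhs rhs, List.append_assoc]
      simp [pvConsume, h]

theorem pvConsume_eq_groups (epsilon : String) (l : List (String × String)) :
    ∀ (it ot : String),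
    pvConsume epsilon it ot l =
      (it, ((pvTakeEps epsilon l).1).foldl (fun out r => if out == epsilon then r else out ++ r) ot)
        :: (pvGroups epsilon (pvTakeEps epsilon l).2).map (pvFoldGroup epsilon) := by
  induction l with
  | nil =>
    intro it ot; simp [pvConsume, pvTakeEps, pvGroups]
  | cons p rest ih =>
    intro it ot
    obtain ⟨lhs, rhs⟩ := p
    by_cases h : lhs == epsilon
    · simp only [pvConsume, pvTakeEps, h, if_true]
      rw [ih]
      rcases he : pvTakeEps epsilon rest with ⟨eps, r⟩
      simp
    · simp only [pvConsume, pvTakeEps, h, if_false, Bool.false_eq_true]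
      rw [ih lhs rhs, pvGroups]
      simp [pvFoldGroup]

-- ===== VERDICT (by name: the statement is the Claim_ definition above) =====
theorem process_alignment_spec : Claim_equal_process_alignment := by
  intro alignment epsilon _
  unfold Spec_process_alignment process_alignment process_alignment_alt
  rw [pvA_eq_consume epsilon alignment [] "__BEGIN__" epsilon,
      pvConsume_eq_groups]
  rcases he : pvTakeEps epsilon alignment with ⟨eps0, rest⟩
  simp [pvFoldGroup]
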